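-- pv_equiv track=rewrite | github.com/ZPGuiGroupWhu/Map-Retrieval-Intention-Recognition | MDL_RM/src/main/intention_recognition/SemanticApriori.py | get_sub_intention_covered_samples
-- ===== SOURCE A (Python) =====
-- def get_sub_intention_covered_samples(sub_intention, all_relevance_concepts_covered_samples, sample_type):
--     result = set()
--     first_value = True
--     for tmp_dim_value in sub_intention:
--         tmp_dim_name, tmp_concept = tmp_dim_value
--         tmp_relation_value_tuple_covered_samples_id = \
--             all_relevance_concepts_covered_samples[tmp_dim_name][tmp_concept][sample_type]
--         if first_value:
--             result |= tmp_relation_value_tuple_covered_samples_id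
--             first_value = False
--         else:
--             result &= tmp_relation_value_tuple_covered_samples_id
--     return result
-- ===== SOURCE B (Python) =====
-- def get_sub_intention_covered_samples(sub_intention, all_relevance_concepts_covered_samples, sample_type):
--     if not sub_intention:
--         return set()
--     counts = {}
--     for tmp_dim_name, tmp_concept in sub_intention:
--         for sample_id in all_relevance_concepts_covered_samples[tmp_dim_name][tmp_concept][sample_type]:
--             counts[sample_id] = counts.get(sample_id, 0) + 1
--     need = len(sub_intention)
--     return {sample_id for sample_id, c in counts.items() if c == need}
-- ===== Notes on version B (the rewrite author's own statement) =====
-- stated objective: alternative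
-- what changed: Replaces A's iterated set-intersection loop (first-value flag, result &= set) by a counting algorithm: one dict counts how many dimension lookups each sample id occurs in, and the result is the set of ids whose count equals the number of dimensions.
import Mathlib
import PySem

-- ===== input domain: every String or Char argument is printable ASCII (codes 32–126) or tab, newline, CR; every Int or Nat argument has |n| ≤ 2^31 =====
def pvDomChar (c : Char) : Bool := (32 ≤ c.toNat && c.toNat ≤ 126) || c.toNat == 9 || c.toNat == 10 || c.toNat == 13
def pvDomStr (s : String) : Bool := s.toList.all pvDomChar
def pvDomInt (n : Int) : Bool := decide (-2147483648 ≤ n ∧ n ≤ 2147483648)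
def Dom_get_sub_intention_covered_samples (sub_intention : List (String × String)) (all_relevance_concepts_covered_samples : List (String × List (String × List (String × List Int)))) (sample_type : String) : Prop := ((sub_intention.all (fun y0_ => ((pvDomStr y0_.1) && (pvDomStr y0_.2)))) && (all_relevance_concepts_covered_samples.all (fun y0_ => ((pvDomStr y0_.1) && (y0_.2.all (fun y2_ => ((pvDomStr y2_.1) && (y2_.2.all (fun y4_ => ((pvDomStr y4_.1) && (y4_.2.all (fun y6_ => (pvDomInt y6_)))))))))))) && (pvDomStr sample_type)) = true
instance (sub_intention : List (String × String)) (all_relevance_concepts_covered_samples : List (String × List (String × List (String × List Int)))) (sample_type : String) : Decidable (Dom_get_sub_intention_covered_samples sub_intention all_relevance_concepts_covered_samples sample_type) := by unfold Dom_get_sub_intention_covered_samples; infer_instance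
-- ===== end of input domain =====

-- B replaces A's iterated set-intersection loop by a counting algorithm: a dict counts in how
-- many dimension lookups each sample id occurs; the result is the ids counted in all of them
-- (objective: alternative — a different algorithm of the same cost).

-- Shared lookup helper: all_relevance_concepts_covered_samples[name][concept][sample_type];
-- none = KeyError (excluded by Pre_); exact Python dict lookup (first match).
def pvFetch? (all_relevance_concepts_covered_samples : List (String × List (String × List (String × List Int)))) (name concept sample_type : String) : Option (List Int) :=
  match PySem.Dict.get? (PySem.Dict.mk all_relevance_concepts_covered_samples) name with
  | none => none
  | some m1 =>
    match PySem.Dict.get? (PySem.Dict.mk m1) concept with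
    | none => none
    | some m2 => PySem.Dict.get? (PySem.Dict.mk m2) sample_type

-- ===== PORT A =====
-- Literal port of A's loop: state (result, first_value); lookup failure (KeyError) is
-- defaulted to [] — such inputs are excluded by Pre_.
def get_sub_intention_covered_samples (sub_intention : List (String × String)) (all_relevance_concepts_covered_samples : List (String × List (String × List (String × List Int)))) (sample_type : String) : List Int :=
  (sub_intention.foldl
    (fun (st : PySem.Set Int × Bool) tmp_dim_value =>
      let tmp_relation_value_tuple_covered_samples_id :=
        (pvFetch? all_relevance_concepts_covered_samples tmp_dim_value.1 tmp_dim_value.2 sample_type).getD []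
      if st.2 then (PySem.Set.union st.1 tmp_relation_value_tuple_covered_samples_id, false)
      else (PySem.Set.inter st.1 tmp_relation_value_tuple_covered_samples_id, st.2))
    (PySem.Set.empty, true)).1

-- ===== PORT B =====
-- Literal port of B: count occurrences of each sample id across the per-dimension lookups in a
-- dict (counts[s] = counts.get(s, 0) + 1), then keep the ids whose count equals len(sub_intention).
def get_sub_intention_covered_samples_alt (sub_intention : List (String × String)) (all_relevance_concepts_covered_samples : List (String × List (String × List (String × List Int)))) (sample_type : String) : List Int :=
  match sub_intention with
  | [] => []
  | _ =>
    let counts := sub_intention.foldl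
      (fun (d : PySem.Dict Int Int) p =>
        ((pvFetch? all_relevance_concepts_covered_samples p.1 p.2 sample_type).getD []).foldl
          (fun d sample_id => d.insert sample_id (d.getD sample_id 0 + 1)) d)
      PySem.Dict.empty
    let need : Int := sub_intention.length
    (counts.items.filter (fun kc => kc.2 == need)).map (fun kc => kc.1)

-- ===== PRECONDITION & SPEC =====
-- Pre_ excludes (a) inputs where A raises KeyError (a (name, concept) of sub_intention or
-- sample_type missing in the nested dict) and (b) looked-up inner lists with duplicates:
-- under the type convention the innermost List Int encodes a Python set, whose elements are
-- distinct, so such lists encode no Python input at all.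
def Pre_get_sub_intention_covered_samples (sub_intention : List (String × String)) (all_relevance_concepts_covered_samples : List (String × List (String × List (String × List Int)))) (sample_type : String) : Prop :=
  ∀ p ∈ sub_intention, (pvFetch? all_relevance_concepts_covered_samples p.1 p.2 sample_type).isSome = true ∧
    ((pvFetch? all_relevance_concepts_covered_samples p.1 p.2 sample_type).getD []).Nodup
instance (sub_intention : List (String × String)) (all_relevance_concepts_covered_samples : List (String × List (String × List (String × List Int)))) (sample_type : String) : Decidable (Pre_get_sub_intention_covered_samples sub_intention all_relevance_concepts_covered_samples sample_type) := by unfold Pre_get_sub_intention_covered_samples; infer_instance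

def pvWitness_get_sub_intention_covered_samples : (List (String × String)) × (List (String × List (String × List (String × List Int)))) × String :=
  ([("d1", "c1"), ("d2", "c2")],
   [("d1", [("c1", [("t", [1, 2, 3])])]), ("d2", [("c2", [("t", [2, 3, 4])])])],
   "t")

def Spec_get_sub_intention_covered_samples (sub_intention : List (String × String)) (all_relevance_concepts_covered_samples : List (String × List (String × List (String × List Int)))) (sample_type : String) (out : List Int) : Prop := out = get_sub_intention_covered_samples_alt sub_intention all_relevance_concepts_covered_samples sample_type
instance (sub_intention : List (String × String)) (all_relevance_concepts_covered_samples : List (String × List (String × List (String × List Int)))) (sample_type : String) (out : List Int) : Decidable (Spec_get_sub_intention_covered_samples sub_intention all_relevance_concepts_covered_samples sample_type out) := by unfold Spec_get_sub_intention_covered_samples; infer_instance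

-- ===== CLAIM =====
def Claim_equal_get_sub_intention_covered_samples : Prop := ∀ (sub_intention : List (String × String)) (all_relevance_concepts_covered_samples : List (String × List (String × List (String × List Int)))) (sample_type : String), Dom_get_sub_intention_covered_samples sub_intention all_relevance_concepts_covered_samples sample_type → Pre_get_sub_intention_covered_samples sub_intention all_relevance_concepts_covered_samples sample_type → Spec_get_sub_intention_covered_samples sub_intention all_relevance_concepts_covered_samples sample_type (get_sub_intention_covered_samples sub_intention all_relevance_concepts_covered_samples sample_type)

-- ===== LEMMAS AND PROOFS =====

-- Once first_value is false it stays false, and A's loop is a plain intersection fold.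
theorem pvFoldFalse (f : String × String → List Int) (xs : List (String × String)) (acc : PySem.Set Int) :
    (xs.foldl
      (fun (st : PySem.Set Int × Bool) v =>
        if st.2 then (PySem.Set.union st.1 (f v), false)
        else (PySem.Set.inter st.1 (f v), st.2))
      (acc, false))
    = (xs.foldl (fun a v => PySem.Set.inter a (f v)) acc, false) := by
  induction xs generalizing acc with
  | nil => rfl
  | cons x xs ih => simpa using ih (PySem.Set.inter acc (f x))

theorem pvUnionEmpty (l : List Int) : PySem.Set.union (PySem.Set.empty : PySem.Set Int) l = PySem.Set.ofList l := by
  simp [PySem.Set.union, PySem.Set.update, PySem.Set.ofList_eq_foldl, PySem.Set.empty]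

-- A's intersection fold is a filter of the accumulator.
theorem pvInterFoldFilter (g : String × String → List Int) (xs : List (String × String)) (acc : List Int) :
    xs.foldl (fun a p => PySem.Set.inter a (g p)) acc
      = acc.filter (fun v => xs.all (fun p => (g p).contains v)) := by
  induction xs generalizing acc with
  | nil => simp
  | cons x xs ih =>
    rw [List.foldl_cons, ih]
    simp only [PySem.Set.inter, List.filter_filter]
    apply List.filter_congr
    intro v _
    simp [Bool.and_comm]

-- Updating a set with further elements does not change a filter whose predicate only holds
-- on elements already present.
theorem pvUpdateFilter (p : Int → Bool) (s : PySem.Set Int) (t : List Int)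
    (h : ∀ v, p v = true → s.contains v = true) :
    (PySem.Set.update s t).filter p = s.filter p := by
  induction t generalizing s with
  | nil => rfl
  | cons y t ih =>
    show (PySem.Set.update (PySem.Set.add s y) t).filter p = _
    have hmono : ∀ v, p v = true → (PySem.Set.add s y).contains v = true := by
      intro v hv
      have := h v hv
      by_cases hy : s.contains y = true <;> simp_all [PySem.Set.add]
    rw [ih (PySem.Set.add s y) hmono]
    by_cases hy : s.contains y = true
    · have hy' : y ∈ s := by simpa using hy
      simp [PySem.Set.add, hy']
    · have hpy : p y = false := by
        by_contra hcon
        exact hy (h y (by simpa using hcon))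
      have hy' : y ∉ s := by simpa using hy
      simp [PySem.Set.add, hy', hpy]

-- Counting across a list of duplicate-free lists: the total count is bounded by the number of
-- lists and reaches it exactly when the element is in every list.
theorem pvFlatCount (ls : List (List Int)) (h : ∀ l ∈ ls, l.Nodup) (v : Int) :
    ls.flatten.count v ≤ ls.length ∧ (ls.flatten.count v = ls.length ↔ ∀ l ∈ ls, v ∈ l) := by
  induction ls with
  | nil => simp
  | cons l ls ih =>
    have hl : l.Nodup := h l (by simp)
    have ih' := ih (fun l' hl' => h l' (by simp [hl']))
    have h1 : l.count v ≤ 1 := List.nodup_iff_count_le_one.mp hl v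
    have hmem : 0 < l.count v ↔ v ∈ l := List.count_pos_iff
    simp only [List.flatten_cons, List.count_append, List.length_cons, List.forall_mem_cons]
    refine ⟨by omega, ?_, ?_⟩
    · intro he
      exact ⟨hmem.mp (by omega), ih'.2.mp (by omega)⟩
    · rintro ⟨h2, h3⟩
      have := hmem.mpr h2
      have := ih'.2.mpr h3
      omega

-- Core identity between the two characterisations, for an arbitrary lookup function g.
theorem pvCore (g : String × String → List Int) (x : String × String) (xs : List (String × String))
    (hnd : ∀ p ∈ x :: xs, (g p).Nodup) :
    (PySem.Set.ofList (g x)).filter (fun v => xs.all (fun p => (g p).contains v))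
      = (PySem.Set.ofList (((x :: xs).map g).flatten)).filter
          (fun v => ((((x :: xs).map g).flatten.count v : Int) == ((x :: xs).length : Int))) := by
  have hofl : PySem.Set.ofList (((x :: xs).map g).flatten)
      = PySem.Set.update (PySem.Set.ofList (g x)) ((xs.map g).flatten) := by
    rw [List.map_cons, List.flatten_cons, PySem.Set.ofList_eq_foldl, List.foldl_append]
    rfl
  have hself : PySem.Set.ofList (g x) = g x :=
    PySem.Set.ofList_eq_self_of_nodup _ (hnd x (by simp))
  have hcnt := pvFlatCount (xs.map g)
    (by intro l hl; rcases List.mem_map.mp hl with ⟨p, hp, rfl⟩; exact hnd p (by simp [hp]))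
  have hout : ∀ v, ((((x :: xs).map g).flatten.count v : Int) == ((x :: xs).length : Int)) = true
      → (PySem.Set.ofList (g x)).contains v = true := by
    intro v hv
    rw [hself]
    simp only [beq_iff_eq, List.map_cons, List.flatten_cons, List.count_append,
      List.length_cons, Nat.cast_inj] at hv
    have hle := (hcnt v).1
    have : v ∈ g x := by
      by_contra hvx
      have : (g x).count v = 0 := List.count_eq_zero.mpr hvx
      simp only [List.length_map] at hle
      omega
    simpa [List.contains_iff_mem] using this
  rw [hofl, pvUpdateFilter _ _ _ hout, hself]
  apply List.filter_congr
  intro v hv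
  have h1 : (g x).count v = 1 := by
    have hb := List.nodup_iff_count_le_one.mp (hnd x (by simp)) v
    have hpos := List.count_pos_iff.mpr hv
    omega
  have hiff := (hcnt v).2
  have hle := (hcnt v).1
  simp only [List.length_map] at hiff hle
  rw [Bool.eq_iff_iff]
  simp only [List.map_cons, List.flatten_cons, List.count_append, List.length_cons, h1,
    List.all_eq_true, beq_iff_eq, Nat.cast_inj]
  constructor
  · intro hall
    have : (xs.map g).flatten.count v = xs.length := by
      apply hiff.mpr
      intro l hl
      rcases List.mem_map.mp hl with ⟨p, hp, rfl⟩
      simpa [List.contains_iff_mem] using hall p hp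
    omega
  · intro hn p hp
    have hall : ∀ l ∈ xs.map g, v ∈ l := hiff.mp (by omega)
    have := hall (g p) (List.mem_map.mpr ⟨p, hp, rfl⟩)
    simpa [List.contains_iff_mem] using this

-- ===== VERDICT (by name: the statement is the Claim_ definition above) =====
theorem get_sub_intention_covered_samples_spec : Claim_equal_get_sub_intention_covered_samples := by
  intro si acs st _ hpre
  show _ = _
  cases si with
  | nil => rfl
  | cons x xs =>
    have hnd : ∀ p ∈ x :: xs, ((fun p => (pvFetch? acs p.1 p.2 st).getD []) p).Nodup :=
      fun p hp => (hpre p hp).2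
    -- A's side: an intersection fold, hence a filter of the first looked-up set
    have hA : get_sub_intention_covered_samples (x :: xs) acs st
        = (PySem.Set.ofList ((pvFetch? acs x.1 x.2 st).getD [])).filter
            (fun v => xs.all (fun p => ((pvFetch? acs p.1 p.2 st).getD []).contains v)) := by
      simp only [get_sub_intention_covered_samples, List.foldl_cons, if_pos]
      rw [pvUnionEmpty, pvFoldFalse (fun p => (pvFetch? acs p.1 p.2 st).getD []) xs,
        pvInterFoldFilter (fun p => (pvFetch? acs p.1 p.2 st).getD []) xs]
    -- B's side: the counting dict is Counter of the concatenation of the looked-up sets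
    have hB : get_sub_intention_covered_samples_alt (x :: xs) acs st
        = (PySem.Set.ofList (((x :: xs).map (fun p => (pvFetch? acs p.1 p.2 st).getD [])).flatten)).filter
            (fun v => ((((x :: xs).map (fun p => (pvFetch? acs p.1 p.2 st).getD [])).flatten.count v : Int)
              == ((x :: xs).length : Int))) := by
      simp only [get_sub_intention_covered_samples_alt]
      have hfold : (x :: xs).foldl
          (fun (d : PySem.Dict Int Int) p =>
            ((pvFetch? acs p.1 p.2 st).getD []).foldl
              (fun d sample_id => d.insert sample_id (d.getD sample_id 0 + 1)) d)
          PySem.Dict.empty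
          = PySem.Dict.counter (((x :: xs).map (fun p => (pvFetch? acs p.1 p.2 st).getD [])).flatten) := by
        rw [← PySem.Dict.foldl_insert_getD_add_one_eq_counter, List.foldl_flatten, List.foldl_map]
      simp only [hfold, PySem.Dict.items_counter, List.filter_map, List.map_map]
      simp [Function.comp_def]
    rw [hA, hB]
    exact pvCore (fun p => (pvFetch? acs p.1 p.2 st).getD []) x xs hnd
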